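-- pv_equiv track=rewrite | github.com/Draam1988/Rafting_secretar | RaftSecretary/raftsecretary/domain/parallel_sprint.py | build_stage_one_matches
-- ===== SOURCE A (Python) =====
-- def main_bracket_size(team_count: int) -> int:
--     if team_count < 3:
--         raise ValueError("Parallel sprint requires at least 3 teams")
--
--     size = 2
--     while size * 2 <= team_count:
--         size *= 2
--     return size
--
-- def stage_one_team_count(team_count: int) -> int:
--     bracket_size = main_bracket_size(team_count)
--     return max(0, 2 * (team_count - bracket_size))
--
-- def build_stage_one_pairs(sprint_order: list[str]) -> list[tuple[str, str]]:
--     count = stage_one_team_count(len(sprint_order))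
--     if count == 0:
--         return []
--
--     stage_one_teams = sprint_order[-count:]
--     return [
--         (stage_one_teams[index], stage_one_teams[-(index + 1)])
--         for index in range(count // 2)
--     ]
--
-- def build_stage_one_matches(sprint_order: list[str]) -> list[tuple[int, str, str]]:
--     direct_qualifiers, _stage_one_teams = split_direct_qualifiers_and_stage_one(sprint_order)
--     pairs = build_stage_one_pairs(sprint_order)
--     first_target_seed = len(direct_qualifiers) + 1
--     return [
--         (first_target_seed + index, left, right)
--         for index, (left, right) in enumerate(pairs)
--     ]
--
-- def split_direct_qualifiers_and_stage_one(
--     sprint_order: list[str],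
-- ) -> tuple[list[str], list[str]]:
--     stage_one_count = stage_one_team_count(len(sprint_order))
--     if stage_one_count == 0:
--         return sprint_order[:], []
--     direct_qualifiers = sprint_order[:-stage_one_count]
--     stage_one_teams = sprint_order[-stage_one_count:]
--     return direct_qualifiers, stage_one_teams
-- ===== SOURCE B (Python) =====
-- def build_stage_one_matches(sprint_order: list[str]) -> list[tuple[int, str, str]]:
--     n = len(sprint_order)
--     if n < 3:
--         raise ValueError("Parallel sprint requires at least 3 teams")
--
--     def bracket(m: int) -> int:
--         return 1 if m < 2 else 2 * bracket(m // 2)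
--
--     count = 2 * (n - bracket(n))
--     seed = n - count + 1
--     teams = sprint_order[n - count:]
--     matches = []
--     while len(teams) >= 2:
--         matches.append((seed, teams[0], teams[-1]))
--         teams = teams[1:-1]
--         seed += 1
--     return matches
-- ===== Notes on version B (the rewrite author's own statement) =====
-- stated objective: alternative
-- what changed: B computes the main bracket size by recursive halving (bracket(m)=1 if m<2 else 2*bracket(m//2)) instead of A's doubling while-loop, and builds the matches by destructively peeling the stage-one list from both ends in a while loop (emit (seed, first, last), then recurse on the middle slice) instead of A's staged helper chain of index comprehensions.
import Mathlib
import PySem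

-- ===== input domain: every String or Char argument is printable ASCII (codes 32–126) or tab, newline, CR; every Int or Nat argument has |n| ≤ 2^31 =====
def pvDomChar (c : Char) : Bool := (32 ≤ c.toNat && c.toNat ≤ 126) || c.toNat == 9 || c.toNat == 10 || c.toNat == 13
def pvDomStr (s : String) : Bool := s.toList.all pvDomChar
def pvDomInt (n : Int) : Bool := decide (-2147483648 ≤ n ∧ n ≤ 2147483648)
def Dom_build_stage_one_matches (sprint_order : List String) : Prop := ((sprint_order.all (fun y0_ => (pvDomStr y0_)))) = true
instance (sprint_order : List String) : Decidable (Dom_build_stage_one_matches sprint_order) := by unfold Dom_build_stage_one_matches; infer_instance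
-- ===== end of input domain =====

-- B computes the bracket size by recursive halving and builds the matches by peeling the
-- stage-one list from both ends in a while loop; objective: alternative algorithm, same results.
-- Both programs raise ValueError for fewer than 3 teams (excluded by Pre_).

-- ===== PORT A =====
-- 'while size * 2 <= team_count: size *= 2', run with fuel = team_count.toNat (more than enough iterations)
def pvMsbLoop : Nat → Int → Int → Int
  | 0, _, size => size
  | fuel + 1, tc, size => if size * 2 ≤ tc then pvMsbLoop fuel tc (size * 2) else size

-- raise ValueError for team_count < 3: placeholder 0 there, excluded by Pre_
def main_bracket_size_A (team_count : Int) : Int :=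
  if team_count < 3 then 0 else pvMsbLoop team_count.toNat team_count 2

def stage_one_team_count_A (team_count : Int) : Int :=
  max 0 (2 * (team_count - main_bracket_size_A team_count))

def build_stage_one_pairs_A (sprint_order : List String) : List (String × String) :=
  let count := stage_one_team_count_A (sprint_order.length : Int)
  if count = 0 then []
  else
    let stage_one_teams := PySem.List.slice sprint_order (some (-count)) none
    (PySem.List.pyRange 0 (PySem.Int.floordiv count 2) 1).map (fun index =>
      (PySem.List.pyGetD stage_one_teams index "",
       PySem.List.pyGetD stage_one_teams (-(index + 1)) ""))

def split_direct_qualifiers_and_stage_one_A (sprint_order : List String) :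
    List String × List String :=
  let stage_one_count := stage_one_team_count_A (sprint_order.length : Int)
  if stage_one_count = 0 then (sprint_order, [])
  else
    (PySem.List.slice sprint_order none (some (-stage_one_count)),
     PySem.List.slice sprint_order (some (-stage_one_count)) none)

def build_stage_one_matches (sprint_order : List String) : List (Int × String × String) :=
  let direct_qualifiers := (split_direct_qualifiers_and_stage_one_A sprint_order).1
  let pairs := build_stage_one_pairs_A sprint_order
  let first_target_seed : Int := (direct_qualifiers.length : Int) + 1
  (PySem.List.enumerate pairs 0).map (fun p => (first_target_seed + p.1, p.2.1, p.2.2))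

-- ===== PORT B =====
-- 'def bracket(m): return 1 if m < 2 else 2 * bracket(m // 2)' (m is a length, so a Nat; // = Nat./)
def pvBracket (m : Nat) : Int :=
  if m < 2 then 1 else 2 * pvBracket (m / 2)

-- 'while len(teams) >= 2: append (seed, teams[0], teams[-1]); teams = teams[1:-1]; seed += 1'
def pvPeel : List String → Int → List (Int × String × String)
  | a :: b :: rest, seed =>
      (seed, a, (b :: rest).getLast (by simp)) ::
        pvPeel ((b :: rest).dropLast) (seed + 1)
  | _, _ => []
termination_by t _ => t.length
decreasing_by simp [List.length_dropLast]

def build_stage_one_matches_alt (sprint_order : List String) : List (Int × String × String) :=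
  let n : Int := sprint_order.length
  if n < 3 then []  -- raise ValueError: excluded by Pre_
  else
    let count : Int := 2 * (n - pvBracket sprint_order.length)
    let seed : Int := n - count + 1
    let teams := PySem.List.slice sprint_order (some (n - count)) none
    pvPeel teams seed

-- ===== PRECONDITION & SPEC =====
-- Both A and B raise ValueError ("Parallel sprint requires at least 3 teams") on fewer than 3 teams.
def Pre_build_stage_one_matches (sprint_order : List String) : Prop := 3 ≤ sprint_order.length
instance (sprint_order : List String) : Decidable (Pre_build_stage_one_matches sprint_order) := by
  unfold Pre_build_stage_one_matches; infer_instance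

def pvWitness_build_stage_one_matches : List String := ["a", "b", "c", "d", "e", "f"]

def Spec_build_stage_one_matches (sprint_order : List String) (out : List (Int × String × String)) : Prop := out = build_stage_one_matches_alt sprint_order
instance (sprint_order : List String) (out : List (Int × String × String)) : Decidable (Spec_build_stage_one_matches sprint_order out) := by unfold Spec_build_stage_one_matches; infer_instance

-- ===== CLAIM (what is proved, stated in full; the proofs are below) =====
def Claim_equal_build_stage_one_matches : Prop := ∀ (sprint_order : List String), Dom_build_stage_one_matches sprint_order → Pre_build_stage_one_matches sprint_order → Spec_build_stage_one_matches sprint_order (build_stage_one_matches sprint_order)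

-- ===== LEMMAS AND PROOFS =====

-- the doubling loop lands on the unique power of two in [2^L, 2^(L+1)) containing tc
lemma pvMsbLoop_spec : ∀ (fuel : Nat) (tc : Int) (k L : Nat),
    (2:Int) ^ k ≤ tc → tc < 2 ^ (k + fuel) →
    (2:Int) ^ L ≤ tc → tc < 2 ^ (L + 1) →
    pvMsbLoop fuel tc ((2:Int) ^ k) = (2:Int) ^ L := by
  intro fuel
  induction fuel with
  | zero =>
    intro tc k L h1 h2 _ _
    simp only [Nat.add_zero] at h2
    omega
  | succ f ih =>
    intro tc k L h1 h2 hL1 hL2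
    show (if (2:Int) ^ k * 2 ≤ tc then pvMsbLoop f tc ((2:Int) ^ k * 2) else (2:Int) ^ k) = _
    by_cases h : (2:Int) ^ k * 2 ≤ tc
    · rw [if_pos h]
      have : (2:Int) ^ k * 2 = 2 ^ (k + 1) := by ring
      rw [this]
      exact ih tc (k + 1) L (this ▸ h) (by ring_nf; ring_nf at h2; omega) hL1 hL2
    · rw [if_neg h]
      have hk2 : tc < (2:Int) ^ (k + 1) := by
        have : (2:Int) ^ (k + 1) = 2 ^ k * 2 := by ring
        omega
      congr 1
      by_contra hne
      rcases Nat.lt_or_ge k L with hlt | hge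
      · have : (2:Int) ^ (k + 1) ≤ 2 ^ L := by
          apply pow_le_pow_right₀ (by norm_num) (by omega)
        omega
      · have hLk : L < k := by omega
        have : (2:Int) ^ (L + 1) ≤ 2 ^ k := by
          apply pow_le_pow_right₀ (by norm_num) (by omega)
        omega

-- recursive halving computes the largest power of two ≤ m
lemma pvBracket_bounds : ∀ (m : Nat), 1 ≤ m →
    ∃ L : Nat, pvBracket m = (2:Int) ^ L ∧ 2 ^ L ≤ m ∧ m < 2 ^ (L + 1) := by
  intro m
  induction m using Nat.strong_induction_on with
  | _ m ih =>
    intro h1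
    rw [pvBracket]
    by_cases h : m < 2
    · rw [if_pos h]
      exact ⟨0, by norm_num, by omega, by omega⟩
    · rw [if_neg h]
      obtain ⟨L, hB, hlo, hhi⟩ := ih (m / 2) (by omega) (by omega)
      refine ⟨L + 1, by rw [hB]; ring, ?_, ?_⟩
      · have : 2 ^ (L + 1) = 2 * 2 ^ L := by ring
        omega
      · have e1 : (2:Nat) ^ (L + 1 + 1) = 2 * 2 ^ (L + 1) := by ring
        omega

-- the peel loop, characterised: first-vs-last pairs of the list, seeds counting up
lemma pvPeel_eq : ∀ (n : Nat) (t : List String) (s : Int), t.length = n → n % 2 = 0 →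
    pvPeel t s = (List.range (t.length / 2)).map
      (fun (i : Nat) => (s + (i : Int), t.getD i "", t.getD (t.length - 1 - i) "")) := by
  intro n
  induction n using Nat.strong_induction_on with
  | _ n ih =>
    intro t s hlen hev
    match t with
    | [] => simp [pvPeel]
    | [a] => simp at hlen; omega
    | a :: b :: rest =>
      simp only [List.length_cons] at hlen
      have hmid : ((b :: rest).dropLast).length = rest.length := by
        simp [List.length_dropLast]
      rw [pvPeel, ih rest.length (by omega) ((b :: rest).dropLast) (s + 1) hmid (by omega)]
      have hlen2 : (a :: b :: rest).length = rest.length + 2 := by simp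
      rw [hlen2, hmid]
      have h2 : (rest.length + 2) / 2 = rest.length / 2 + 1 := by omega
      rw [h2, List.range_succ_eq_map, List.map_cons, List.map_map]
      congr 1
      · -- head element
        refine Prod.ext (by simp) (Prod.ext ?_ ?_)
        · simp
        · show (a :: b :: rest).getLast (by simp) = (a :: b :: rest).getD (rest.length + 2 - 1 - 0) ""
          rw [List.getLast_eq_getElem, List.getD_eq_getElem _ _ (by simp)]
          congr 1
      · -- tail elements
        apply List.map_congr_left
        intro i hi
        have hi' : i < rest.length / 2 := List.mem_range.mp hi
        have hir : i < rest.length := by omega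
        simp only [Function.comp]
        refine Prod.ext ?_ (Prod.ext ?_ ?_)
        · show s + 1 + (i : Int) = s + ((i + 1 : Nat) : Int)
          push_cast; ring
        · show ((b :: rest).dropLast).getD i "" = (a :: b :: rest).getD (i + 1) ""
          rw [List.getD_eq_getElem _ _ (by omega), List.getD_eq_getElem _ _ (by simp; omega)]
          simp [List.getElem_dropLast]
        · show ((b :: rest).dropLast).getD (rest.length - 1 - i) ""
            = (a :: b :: rest).getD (rest.length + 2 - 1 - (i + 1)) ""
          have he : rest.length + 2 - 1 - (i + 1) = (rest.length - 1 - i) + 1 := by omega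
          rw [he, List.getD_eq_getElem _ _ (by omega), List.getD_eq_getElem _ _ (by simp; omega)]
          simp [List.getElem_dropLast]

set_option maxHeartbeats 1000000 in
lemma main_eq (so : List String) (hpre : 3 ≤ so.length) :
    build_stage_one_matches so = build_stage_one_matches_alt so := by
  have hn3 : (3:Int) ≤ (so.length : Int) := by exact_mod_cast hpre
  obtain ⟨L, hbrB, hge, hlt'⟩ := pvBracket_bounds so.length (by omega)
  -- A's doubling loop computes 2 ^ L
  have hbr : main_bracket_size_A (so.length : Int) = 2 ^ L := by
    unfold main_bracket_size_A
    rw [if_neg (by omega)]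
    have ht : ((so.length : Int)).toNat = so.length := by simp
    rw [ht]
    have h1 : (2:Int) ^ 1 ≤ (so.length : Int) := by rw [pow_one]; omega
    have h2 : (so.length : Int) < 2 ^ (1 + so.length) := by
      have ha : (so.length : Int) < 2 ^ so.length := by exact_mod_cast Nat.lt_two_pow_self
      have hb : (2:Int) ^ so.length ≤ 2 ^ (1 + so.length) :=
        pow_le_pow_right₀ (by norm_num) (by omega)
      omega
    have h3 : (2:Int) ^ L ≤ (so.length : Int) := by exact_mod_cast hge
    have h4 : (so.length : Int) < 2 ^ (L + 1) := by exact_mod_cast hlt'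
    have := pvMsbLoop_spec so.length (so.length : Int) 1 L h1 h2 h3 h4
    rw [pow_one] at this
    exact this
  -- the stage-one team count, as a natural number
  have h2L : 2 ^ L ≤ so.length := hge
  set c : Nat := 2 * (so.length - 2 ^ L) with hc
  have hcn : c ≤ so.length := by
    have := hlt'
    have h21 : (2:Nat) ^ (L + 1) = 2 * 2 ^ L := by ring
    omega
  have hcast : (2 : Int) * ((so.length : Int) - 2 ^ L) = (c : Int) := by
    rw [hc]; push_cast [Nat.cast_sub h2L]; ring
  have hcount : stage_one_team_count_A (so.length : Int) = (c : Int) := by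
    unfold stage_one_team_count_A
    rw [hbr, ← hcast]
    have : (0:Int) ≤ 2 * ((so.length : Int) - 2 ^ L) := by
      have : (2:Int) ^ L ≤ (so.length : Int) := by exact_mod_cast h2L
      omega
    omega
  unfold build_stage_one_matches build_stage_one_matches_alt
    split_direct_qualifiers_and_stage_one_A build_stage_one_pairs_A
  simp only [hcount, hbrB, hcast, if_neg (by omega : ¬ ((so.length : Int) < 3))]
  have hbase : (so.length : Int) - (c : Int) = ((so.length - c : Nat) : Int) := by
    push_cast [Nat.cast_sub hcn]; ring
  have hsliceB : PySem.List.slice so (some ((so.length : Int) - (c : Int))) none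
      = so.drop (so.length - c) := by
    rw [hbase, PySem.List.slice_from_natCast]
  by_cases hc0 : c = 0
  · -- no stage-one round: both sides are []
    rw [hc0] at hsliceB ⊢
    simp only [Nat.cast_zero, sub_zero, Nat.sub_zero] at hsliceB ⊢
    rw [hsliceB]
    simp [PySem.List.enumerate_nil, List.drop_length, pvPeel]
  · -- a stage-one round exists
    have hcpos : 0 < c := Nat.pos_of_ne_zero hc0
    have hne : ¬((c : Int) = 0) := by exact_mod_cast hc0
    have hceven : c % 2 = 0 := by omega
    have hsliceA : PySem.List.slice so (some (-(c : Int))) none = so.drop (so.length - c) :=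
      PySem.List.slice_from_neg_natCast so c hcpos
    have hdq : (PySem.List.slice so none (some (-(c : Int)))).length = so.length - c := by
      rw [PySem.List.slice_to_neg_natCast so c hcpos]
      simp
    have hfd : PySem.Int.floordiv (c : Int) 2 = ((c / 2 : Nat) : Int) := by
      exact_mod_cast PySem.Int.floordiv_natCast c 2
    simp only [if_neg hne]
    rw [hsliceA, hsliceB, hdq, hfd, PySem.List.pyRange_zero_nat]
    have hteams : (so.drop (so.length - c)).length = c := by
      rw [List.length_drop]; omega
    rw [pvPeel_eq c (so.drop (so.length - c)) _ hteams hceven, hteams]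
    apply List.ext_getElem
    · simp [PySem.List.length_enumerate]
    · intro k h1 h2
      have hk : k < c / 2 := by
        simpa [PySem.List.length_enumerate] using h1
      have hk1 : k + 1 ≤ (so.drop (so.length - c)).length := by rw [hteams]; omega
      simp only [List.getElem_map, PySem.List.getElem_enumerate, List.getElem_range,
        Prod.mk.injEq]
      refine ⟨?_, ?_, ?_⟩
      · push_cast [Nat.cast_sub hcn]; ring
      · rw [List.getD_eq_getElem _ _ (by rw [hteams]; omega)]
        rw [PySem.List.pyGetD_eq_getElem _ _ (by positivity) (by rw [hteams]; omega)]
        simp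
      · have e1 : -((k : Int) + 1) = -(((k + 1 : Nat)) : Int) := by push_cast; ring
        rw [e1, PySem.List.pyGetD_neg_natCast _ _ _ (by omega) hk1]
        rw [List.getD_eq_getElem _ _ (by rw [hteams]; omega)]
        simp only [List.getElem_drop]
        congr 1
        omega

-- ===== VERDICT (by name: the statement is the Claim_ definition above) =====
theorem build_stage_one_matches_spec : Claim_equal_build_stage_one_matches := by
  intro so _ hpre
  unfold Spec_build_stage_one_matches
  exact main_eq so hpre
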